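-- pv_equiv track=rewrite | github.com/pydicom/deid | deid/config/utils.py | parse_filter_group
-- ===== SOURCE A (Python) =====
-- def parse_filter_group(spec):
--     """given the specification (a list of lines) continue parsing lines
--     until the filter group ends, as indicated by the start of a new LABEL,
--     (case 1), the start of a new section (case 2) or the end of the spec
--     file (case 3). Returns a list of members (lines) that belong to the
--     filter group. The list (by way of using pop) is updated in the calling
--     function.
--
--     Parameters
--     ==========
--     spec: unparsed lines of the deid recipe file
--     """
--     members = []
--     keep_going = True
--     while keep_going and spec:
--         next_line = spec[0]
--         if next_line.upper().strip().startswith("LABEL"):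
--             keep_going = False
--         elif next_line.upper().strip().startswith("%"):
--             keep_going = False
--         else:
--             new_member = spec.pop(0)
--             members.append(new_member)
--     return members
-- ===== SOURCE B (Python) =====
-- def parse_filter_group(spec):
--     count = 0
--     for line in spec:
--         s = line.upper().strip()
--         if s.startswith("LABEL") or s.startswith("%"):
--             break
--         count += 1
--     members = spec[:count]
--     del spec[:count]
--     return members
-- ===== Notes on version B (the rewrite author's own statement) =====
-- stated objective: faster
-- what changed: B first scans for the boundary index (first LABEL/% line), then returns spec[:count] and removes the prefix with one bulk 'del spec[:count]', instead of A's peek-then-pop(0)-one-at-a-time loop with a keep_going flag.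
import Mathlib
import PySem

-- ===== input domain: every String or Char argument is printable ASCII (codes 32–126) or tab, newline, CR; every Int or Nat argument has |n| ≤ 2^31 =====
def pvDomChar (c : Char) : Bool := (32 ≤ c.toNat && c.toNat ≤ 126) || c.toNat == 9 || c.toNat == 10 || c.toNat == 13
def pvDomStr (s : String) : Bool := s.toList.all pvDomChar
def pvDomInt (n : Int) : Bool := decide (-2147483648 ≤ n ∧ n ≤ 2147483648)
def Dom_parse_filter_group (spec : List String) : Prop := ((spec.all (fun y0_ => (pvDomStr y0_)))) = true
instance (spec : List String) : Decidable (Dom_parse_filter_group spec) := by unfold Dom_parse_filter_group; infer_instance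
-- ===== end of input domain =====

-- B finds the boundary index first and splices once instead of A's peek-and-pop(0) loop;
-- both Pythons mutate the caller's list identically, the theorems here are about the return value.

-- ===== PORT A =====
-- A's while loop: peek at spec[0]; stop on LABEL / '%', else pop it into members.
def parse_filter_group : List String → List String
  | [] => []
  | next_line :: rest =>
    if PySem.Str.startswith (PySem.Str.strip (PySem.Str.upper next_line)) "LABEL" then []
    else if PySem.Str.startswith (PySem.Str.strip (PySem.Str.upper next_line)) "%" then []
    else next_line :: parse_filter_group rest

-- ===== PORT B =====
-- B's boundary scan: index of the first LABEL/% line (or the length).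
def pfgCount : List String → Nat
  | [] => 0
  | line :: rest =>
    let s := PySem.Str.strip (PySem.Str.upper line)
    if PySem.Str.startswith s "LABEL" || PySem.Str.startswith s "%" then 0
    else pfgCount rest + 1

def parse_filter_group_alt (spec : List String) : List String :=
  spec.take (pfgCount spec)

-- ===== PRECONDITION & SPEC =====
def Spec_parse_filter_group (spec : List String) (out : List String) : Prop := out = parse_filter_group_alt spec
instance (spec : List String) (out : List String) : Decidable (Spec_parse_filter_group spec out) := by unfold Spec_parse_filter_group; infer_instance

-- ===== CLAIM (what is proved, stated in full; the proofs are below) =====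
def Claim_equal_parse_filter_group : Prop := ∀ (spec : List String), Dom_parse_filter_group spec → Spec_parse_filter_group spec (parse_filter_group spec)

-- ===== LEMMAS AND PROOFS =====
theorem pfg_eq (spec : List String) : parse_filter_group spec = parse_filter_group_alt spec := by
  induction spec with
  | nil => rfl
  | cons l rest ih =>
    simp only [parse_filter_group, parse_filter_group_alt, pfgCount]
    split_ifs with h1 h2 h3 <;>
      simp_all [parse_filter_group_alt, List.take_succ_cons]

-- ===== VERDICT (by name: the statement is the Claim_ definition above) =====
theorem parse_filter_group_spec : Claim_equal_parse_filter_group := by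
  intro spec _
  exact pfg_eq spec
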